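-- pv_equiv track=rewrite | github.com/sowmyavoona96/csci544 | Assignment_1_Naive_Bayes/nblearn.py | stripPunc
-- ===== SOURCE A (Python) =====
-- import string
--
-- def stripPunc(content):
--     ans = ''
--     for i in range(0, len(content)):
--         if content[i] in string.punctuation:
--             # content = content[:i] + ' punc ' + content[i+1:]
--             # ans += ' '
--             if content[i] == "'":
--                 ans += ''
--             else: ans += ' punc '
--         else:
--             ans+=content[i]
--
--     return ans
-- ===== SOURCE B (Python) =====
-- import re
-- import string
--
-- _PUNC_RE = re.compile('[' + re.escape(string.punctuation) + ']')
--
-- def stripPunc(content):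
--     # match-driven scan: each punctuation char is replaced independently
--     return _PUNC_RE.sub(lambda m: '' if m.group() == "'" else ' punc ', content)
-- ===== Notes on version B (the rewrite author's own statement) =====
-- stated objective: faster
-- what changed: Replaced the explicit index loop with per-char membership testing and string concatenation by a single compiled-regex substitution whose replacement callable handles each matched punctuation char.
import Mathlib
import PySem

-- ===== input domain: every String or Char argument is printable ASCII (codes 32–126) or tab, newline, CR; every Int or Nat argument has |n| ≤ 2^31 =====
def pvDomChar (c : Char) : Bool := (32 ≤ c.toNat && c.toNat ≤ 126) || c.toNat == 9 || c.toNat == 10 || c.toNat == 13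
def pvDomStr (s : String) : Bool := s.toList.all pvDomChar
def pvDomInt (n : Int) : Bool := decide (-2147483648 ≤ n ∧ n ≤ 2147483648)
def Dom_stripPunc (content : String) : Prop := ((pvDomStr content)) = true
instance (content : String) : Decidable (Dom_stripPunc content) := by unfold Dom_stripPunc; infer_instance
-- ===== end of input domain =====

-- B replaces A's index loop and per-char membership test with a single regex-style
-- match-driven substitution over the string (objective: idiomatic); return values only.

-- string.punctuation
def pvPunct : List Char := "!\"#$%&'()*+,-./:;<=>?@[\\]^_`{|}~".toList

-- ===== PORT A =====
def stripPunc (content : String) : String :=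
  String.mk
    ((PySem.List.pyRange 0 (content.toList.length : Int) 1).foldl
      (fun ans i =>
        let c := PySem.List.pyGetD content.toList i ' '
        if pvPunct.contains c then
          if c = '\'' then ans ++ [] else ans ++ " punc ".toList
        else ans ++ [c])
      [])

-- ===== PORT B =====
-- the single-char substitution performed for each regex match
def pvRepl (c : Char) : List Char :=
  if pvPunct.contains c then (if c = '\'' then [] else " punc ".toList) else [c]

def stripPunc_alt (content : String) : String :=
  String.mk (content.toList.flatMap pvRepl)

-- ===== PRECONDITION & SPEC =====
def Spec_stripPunc (content : String) (out : String) : Prop := out = stripPunc_alt content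
instance (content : String) (out : String) : Decidable (Spec_stripPunc content out) := by unfold Spec_stripPunc; infer_instance

-- ===== CLAIM (what is proved, stated in full; the proofs are below) =====
def Claim_equal_stripPunc : Prop := ∀ (content : String), Dom_stripPunc content → Spec_stripPunc content (stripPunc content)

-- ===== LEMMAS AND PROOFS =====

-- ===== VERDICT (by name: the statement is the Claim_ definition above) =====
theorem stripPunc_spec : Claim_equal_stripPunc := by
  intro content _
  unfold Spec_stripPunc stripPunc stripPunc_alt
  rw [PySem.List.foldl_pyRange_zero_pyGetD' (xs := content.toList) (d := ' ')
        (f := fun ans c =>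
          if pvPunct.contains c then
            if c = '\'' then ans ++ [] else ans ++ " punc ".toList
          else ans ++ [c]) (init := [])]
  have h : (fun (ans : List Char) (c : Char) =>
      if pvPunct.contains c then
        if c = '\'' then ans ++ [] else ans ++ " punc ".toList
      else ans ++ [c]) = fun ans c => ans ++ pvRepl c := by
    funext ans c
    unfold pvRepl
    split_ifs <;> simp
  rw [h, PySem.List.foldl_append_eq_flatMap]
  simp
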